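-- pv_equiv track=rewrite | github.com/kcgroulx/ELEC391 | tools/generate_planned_song.py | canonicalize_midi_notes
-- ===== SOURCE A (Python) =====
-- ROBOT_NOTE_MIN = 36
--
-- ROBOT_NOTE_MAX = 71
--
-- MAX_CHORD_NOTES = 5
--
-- def canonicalize_midi_notes(midi_notes: list[int]) -> list[int]:
--     unique_notes = sorted(
--         {int(note) for note in midi_notes if ROBOT_NOTE_MIN <= int(note) <= ROBOT_NOTE_MAX}
--     )
--     if not unique_notes:
--         raise ValueError("At least one note must be in range C2-B4.")
--     if len(unique_notes) > MAX_CHORD_NOTES: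
--         raise ValueError(f"At most {MAX_CHORD_NOTES} simultaneous notes are supported.")
--     return unique_notes
-- ===== SOURCE B (Python) =====
-- ROBOT_NOTE_MIN = 36
--
-- ROBOT_NOTE_MAX = 71
--
-- MAX_CHORD_NOTES = 5
--
-- def canonicalize_midi_notes(midi_notes: list[int]) -> list[int]:
--     span = ROBOT_NOTE_MAX - ROBOT_NOTE_MIN + 1
--     present = [False] * span
--     for note in midi_notes:
--         v = int(note)
--         if ROBOT_NOTE_MIN <= v <= ROBOT_NOTE_MAX:
--             present[v - ROBOT_NOTE_MIN] = True
--     result = [ROBOT_NOTE_MIN + i for i in range(span) if present[i]]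
--     if not result:
--         raise ValueError("At least one note must be in range C2-B4.")
--     if len(result) > MAX_CHORD_NOTES:
--         raise ValueError(f"At most {MAX_CHORD_NOTES} simultaneous notes are supported.")
--     return result
-- ===== Notes on version B (the rewrite author's own statement) =====
-- stated objective: alternative
-- what changed: Replaces the set-comprehension-plus-comparison-sort with a fixed-size boolean presence array over the 36-note range and an ascending bucket scan of that range, so no sort is performed.
-- outside the precondition, e.g. on canonicalize_midi_notes([1, 100]): A raises ValueError, B raises ValueError; on canonicalize_midi_notes([36, 37, 38, 39, 40, 41]): A raises ValueError, B raises ValueError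
import Mathlib
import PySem

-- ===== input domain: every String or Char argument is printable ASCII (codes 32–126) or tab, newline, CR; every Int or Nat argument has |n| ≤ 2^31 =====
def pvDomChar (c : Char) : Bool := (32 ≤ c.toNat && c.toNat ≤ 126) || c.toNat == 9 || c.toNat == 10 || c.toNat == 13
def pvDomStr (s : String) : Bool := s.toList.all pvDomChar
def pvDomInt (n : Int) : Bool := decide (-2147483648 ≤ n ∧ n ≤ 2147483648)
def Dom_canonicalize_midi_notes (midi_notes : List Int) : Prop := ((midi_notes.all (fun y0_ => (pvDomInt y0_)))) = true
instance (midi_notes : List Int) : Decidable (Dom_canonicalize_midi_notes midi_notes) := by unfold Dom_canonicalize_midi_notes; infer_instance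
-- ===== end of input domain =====

-- B replaces sorted(set(...)) by a fixed-size presence array plus an ascending scan of the
-- bounded 36..71 range (no comparison sort); return values proved equal on Pre_.

-- ===== PORT A =====
-- Python raises ValueError on the two guards; those inputs are excluded by Pre_ (port returns [] there).
def canonicalize_midi_notes (midi_notes : List Int) : List Int :=
  let unique := PySem.List.sorted
    (PySem.Set.ofList (midi_notes.filter (fun note => decide (36 ≤ note ∧ note ≤ 71))))
    (fun x => x) false
  if unique = [] then []
  else if 5 < unique.length then []
  else unique

-- ===== PORT B =====
-- body of B's marking loop: present[v-36] = True when v is in range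
def pvStep (acc : List Bool) (v : Int) : List Bool :=
  if 36 ≤ v ∧ v ≤ 71 then PySem.List.pySetD acc (v - 36) true else acc

def canonicalize_midi_notes_alt (midi_notes : List Int) : List Int :=
  let present := midi_notes.foldl pvStep (List.replicate 36 false)
  let result := (List.range 36).filterMap
    (fun i => if present.getD i false then some ((36 : Int) + i) else none)
  if result = [] then []
  else if 5 < result.length then []
  else result

-- ===== PRECONDITION & SPEC =====
-- Pre_ excludes exactly the inputs on which the Python raises ValueError: no note in 36..71,
-- or more than 5 distinct in-range notes.
def Pre_canonicalize_midi_notes (midi_notes : List Int) : Prop :=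
  (∃ n ∈ midi_notes, 36 ≤ n ∧ n ≤ 71) ∧
  (PySem.List.dedup (midi_notes.filter (fun note => decide (36 ≤ note ∧ note ≤ 71)))).length ≤ 5
instance (midi_notes : List Int) : Decidable (Pre_canonicalize_midi_notes midi_notes) := by
  unfold Pre_canonicalize_midi_notes; infer_instance
def pvWitness_canonicalize_midi_notes : List Int := [60, 40, 60, 71, 36]

def Spec_canonicalize_midi_notes (midi_notes : List Int) (out : List Int) : Prop := out = canonicalize_midi_notes_alt midi_notes
instance (midi_notes : List Int) (out : List Int) : Decidable (Spec_canonicalize_midi_notes midi_notes out) := by unfold Spec_canonicalize_midi_notes; infer_instance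

-- ===== CLAIM (what is proved, stated in full; the proofs are below) =====
def Claim_equal_canonicalize_midi_notes : Prop := ∀ (midi_notes : List Int), Dom_canonicalize_midi_notes midi_notes → Pre_canonicalize_midi_notes midi_notes → Spec_canonicalize_midi_notes midi_notes (canonicalize_midi_notes midi_notes)

-- ===== LEMMAS AND PROOFS =====

lemma pvStep_length (acc : List Bool) (v : Int) (h : acc.length = 36) :
    (pvStep acc v).length = 36 := by
  unfold pvStep
  split_ifs with hv
  · rw [PySem.List.pySetD_of_nonneg _ _ (by omega)]; simpa using h
  · exact h

-- invariant: entry i of the presence array records whether 36+i has been seen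
lemma pvFoldl_getD (l : List Int) (acc : List Bool) (h : acc.length = 36)
    (i : Nat) (hi : i < 36) :
    (l.foldl pvStep acc).getD i false
      = (acc.getD i false || l.any (fun v => decide (v = 36 + (i : Int)))) := by
  induction l generalizing acc with
  | nil => simp
  | cons v t ih =>
    rw [List.foldl_cons, ih _ (pvStep_length acc v h)]
    unfold pvStep
    split_ifs with hv
    · rw [PySem.List.pySetD_of_nonneg _ _ (by omega)]
      by_cases hvi : v = 36 + (i : Int)
      · have hidx : (v - 36).toNat = i := by omega
        have hlt : i < acc.length := by omega
        simp [List.getD, hlt, hvi]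
      · have hne : (v - 36).toNat ≠ i := by omega
        simp [List.getD, hne, hvi]
    · have hvi : ¬ v = 36 + (i : Int) := by omega
      simp [hvi]

-- getD on the all-false initial array
lemma pvGetD_replicate (i : Nat) : (List.replicate 36 false).getD i false = false := by
  rw [List.getD_eq_getElem?_getD, List.getElem?_replicate]
  split <;> rfl

-- membership in B's result list
lemma pvMem_result (midi_notes : List Int) (x : Int) :
    (x ∈ (List.range 36).filterMap
        (fun i => if (midi_notes.foldl pvStep (List.replicate 36 false)).getD i false
                  then some ((36 : Int) + i) else none))
      ↔ x ∈ midi_notes.filter (fun note => decide (36 ≤ note ∧ note ≤ 71)) := by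
  constructor
  · intro hx
    rcases List.mem_filterMap.mp hx with ⟨i, hir, hsome⟩
    have hi : i < 36 := List.mem_range.mp hir
    by_cases hp : (midi_notes.foldl pvStep (List.replicate 36 false)).getD i false = true
    · simp only [if_pos hp] at hsome
      have hxe : x = 36 + (i : Int) := (Option.some_inj.mp hsome).symm
      rw [pvFoldl_getD _ _ (by simp) i hi, pvGetD_replicate, Bool.false_or,
        List.any_eq_true] at hp
      rcases hp with ⟨v, hv, hve⟩
      rw [decide_eq_true_eq] at hve
      refine List.mem_filter.mpr ⟨?_, by simp; omega⟩
      rw [hxe, ← hve]; exact hv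
    · rw [Bool.not_eq_true] at hp
      rw [hp] at hsome
      simp at hsome
  · intro hx
    rcases List.mem_filter.mp hx with ⟨hmem, hrange⟩
    simp only [decide_eq_true_eq] at hrange
    have hi : (x - 36).toNat < 36 := by omega
    refine List.mem_filterMap.mpr ⟨(x - 36).toNat, List.mem_range.mpr hi, ?_⟩
    have hp : (midi_notes.foldl pvStep (List.replicate 36 false)).getD (x - 36).toNat false = true := by
      rw [pvFoldl_getD _ _ (by simp) _ hi, pvGetD_replicate, Bool.false_or, List.any_eq_true]
      exact ⟨x, hmem, by rw [decide_eq_true_eq]; omega⟩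
    rw [if_pos hp]
    congr 1; omega

-- B's result list is strictly increasing
lemma pvResult_pairwise (midi_notes : List Int) :
    ((List.range 36).filterMap
        (fun i => if (midi_notes.foldl pvStep (List.replicate 36 false)).getD i false
                  then some ((36 : Int) + i) else none)).Pairwise (· < ·) := by
  refine List.pairwise_filterMap.mpr ?_
  refine List.Pairwise.imp ?_ (List.pairwise_lt_range (n := 36))
  intro a b hab x hx y hy
  split_ifs at hx hy
  all_goals simp_all
  omega

-- the central identity: sorted(set(filtered)) equals B's range scan
lemma pvSorted_eq (midi_notes : List Int) :
    PySem.List.sorted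
      (PySem.Set.ofList (midi_notes.filter (fun note => decide (36 ≤ note ∧ note ≤ 71))))
      (fun x => x) false
    = (List.range 36).filterMap
        (fun i => if (midi_notes.foldl pvStep (List.replicate 36 false)).getD i false
                  then some ((36 : Int) + i) else none) := by
  apply PySem.List.sorted_id_eq_of_perm_of_pairwise
  · refine (List.perm_ext_iff_of_nodup ((pvResult_pairwise midi_notes).imp ne_of_lt)
      (PySem.Set.nodup_ofList _)).mpr (fun x => ?_)
    rw [pvMem_result, PySem.Set.mem_ofList]
  · exact (pvResult_pairwise midi_notes).imp le_of_lt

-- ===== VERDICT (by name: the statement is the Claim_ definition above) =====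
theorem canonicalize_midi_notes_spec : Claim_equal_canonicalize_midi_notes := by
  intro midi_notes _ _
  unfold Spec_canonicalize_midi_notes canonicalize_midi_notes canonicalize_midi_notes_alt
  simp only [pvSorted_eq]
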